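-- pv_equiv track=rewrite | github.com/YF36/nanobot | nanobot/agent/memory_maintenance.py | _parse_history_entries
-- ===== SOURCE A (Python) =====
-- def _parse_history_entries(history_text: str) -> list[str]:
--     entries: list[str] = []
--     cur: list[str] = []
--     for line in history_text.splitlines():
--         if line.strip():
--             cur.append(line.rstrip())
--             continue
--         if cur:
--             entries.append(" ".join(cur).strip())
--             cur = []
--     if cur:
--         entries.append(" ".join(cur).strip())
--     return entries
-- ===== SOURCE B (Python) =====
-- from itertools import groupby
--
--
-- def _parse_history_entries(history_text: str) -> list[str]:
--     return [
--         " ".join(line.rstrip() for line in group).strip()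
--         for nonblank, group in groupby(
--             history_text.splitlines(), key=lambda line: bool(line.strip())
--         )
--         if nonblank
--     ]
-- ===== Notes on version B (the rewrite author's own statement) =====
-- stated objective: idiomatic
-- what changed: Replaces the explicit cur accumulator with its post-loop flush by itertools.groupby on the blank/non-blank key plus a single comprehension over the non-blank groups.
import Mathlib
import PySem

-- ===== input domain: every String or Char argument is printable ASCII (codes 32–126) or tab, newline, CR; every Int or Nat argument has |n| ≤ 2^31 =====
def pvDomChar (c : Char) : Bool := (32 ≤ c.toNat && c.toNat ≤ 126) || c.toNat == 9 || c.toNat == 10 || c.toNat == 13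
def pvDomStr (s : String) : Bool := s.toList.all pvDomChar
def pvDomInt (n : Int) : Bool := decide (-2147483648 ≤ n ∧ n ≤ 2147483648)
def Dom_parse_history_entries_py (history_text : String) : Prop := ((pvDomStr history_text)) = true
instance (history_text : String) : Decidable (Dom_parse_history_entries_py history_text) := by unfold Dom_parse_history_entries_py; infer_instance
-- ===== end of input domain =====

-- B replaces A's explicit running accumulator + post-loop flush by grouping the lines
-- into maximal blank/non-blank runs (itertools.groupby) and mapping over the non-blank runs.

-- ===== PORT A =====
-- loop body of A: state = (entries, cur)
def pvStepA (s : List String × List String) (line : String) : List String × List String :=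
  if PySem.Str.strip line ≠ "" then (s.1, s.2 ++ [PySem.Str.rstrip line])
  else if s.2 ≠ [] then (s.1 ++ [PySem.Str.strip (PySem.Str.join " " s.2)], [])
  else s

def parse_history_entries_py (history_text : String) : List String :=
  let st := (PySem.Str.splitlines history_text).foldl pvStepA ([], [])
  if st.2 ≠ [] then st.1 ++ [PySem.Str.strip (PySem.Str.join " " st.2)] else st.1

-- ===== PORT B =====
-- key(line) = bool(line.strip())
def pvKey (line : String) : Bool := !(PySem.Str.strip line == "")

-- itertools.groupby(lines, key=pvKey): maximal runs of consecutive lines with equal key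
def pvGroupby (lines : List String) : List (Bool × List String) :=
  match lines with
  | [] => []
  | l :: rest =>
    (pvKey l, l :: rest.takeWhile (fun x => pvKey x == pvKey l)) ::
      pvGroupby (rest.dropWhile (fun x => pvKey x == pvKey l))
termination_by lines.length
decreasing_by
  simp only [List.length_cons]
  exact Nat.lt_succ_of_le (List.length_dropWhile_le _ _)

def parse_history_entries_py_alt (history_text : String) : List String :=
  ((pvGroupby (PySem.Str.splitlines history_text)).filter (·.1)).map
    (fun g => PySem.Str.strip (PySem.Str.join " " (g.2.map PySem.Str.rstrip)))

-- ===== PRECONDITION & SPEC =====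
def Spec_parse_history_entries_py (history_text : String) (out : List String) : Prop := out = parse_history_entries_py_alt history_text
instance (history_text : String) (out : List String) : Decidable (Spec_parse_history_entries_py history_text out) := by unfold Spec_parse_history_entries_py; infer_instance

-- ===== CLAIM (what is proved, stated in full; the proofs are below) =====
def Claim_equal_parse_history_entries_py : Prop := ∀ (history_text : String), Dom_parse_history_entries_py history_text → Spec_parse_history_entries_py history_text (parse_history_entries_py history_text)

-- ===== LEMMAS AND PROOFS =====

-- " ".join(cur).strip()
def pvFlush (cs : List String) : String := PySem.Str.strip (PySem.Str.join " " cs)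

-- the comprehension of B, applied to a group list
def pvBMap (gs : List (Bool × List String)) : List String :=
  (gs.filter (·.1)).map (fun g => pvFlush (g.2.map PySem.Str.rstrip))

-- B's value when a non-empty accumulator `cur` is pending in A's loop
def pvRest (cur : List String) (gs : List (Bool × List String)) : List String :=
  match gs with
  | (true, g) :: tail => pvFlush (cur ++ g.map PySem.Str.rstrip) :: pvBMap tail
  | _ => pvFlush cur :: pvBMap gs

lemma pvBMap_skip (l : String) (rest : List String) (h : pvKey l = false) :
    pvBMap (pvGroupby (l :: rest)) = pvBMap (pvGroupby rest) := by
  rw [pvGroupby]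
  cases rest with
  | nil => simp [h, pvBMap, pvGroupby]
  | cons r rs =>
    cases hk : pvKey r with
    | false =>
      rw [List.dropWhile_cons_of_pos (by simp [hk, h])]
      conv_rhs => rw [pvGroupby]
      simp [pvBMap, h, hk]
    | true =>
      rw [List.dropWhile_cons_of_neg (by simp [hk, h])]
      simp [pvBMap, h]

lemma pv_main (lines : List String) : ∀ (entries cur : List String),
    (let st := lines.foldl pvStepA (entries, cur);
      if st.2 ≠ [] then st.1 ++ [pvFlush st.2] else st.1)
      = entries ++ (if cur = [] then pvBMap (pvGroupby lines) else pvRest cur (pvGroupby lines)) := by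
  induction lines with
  | nil =>
    intro entries cur
    cases cur with
    | nil => simp [pvGroupby, pvBMap]
    | cons c cs => simp [pvGroupby, pvRest, pvBMap]
  | cons l rest ih =>
    intro entries cur
    simp only [List.foldl_cons]
    cases hk : pvKey l with
    | true =>
      have hs : PySem.Str.strip l ≠ "" := by
        simpa [pvKey] using hk
      rw [show pvStepA (entries, cur) l = (entries, cur ++ [PySem.Str.rstrip l]) by
        simp [pvStepA, hs]]
      rw [ih entries (cur ++ [PySem.Str.rstrip l])]
      have hne : cur ++ [PySem.Str.rstrip l] ≠ [] := by simp
      rw [if_neg hne]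
      rw [pvGroupby]
      simp only [hk]
      cases rest with
      | nil =>
        cases cur <;> simp [pvRest, pvGroupby, pvBMap, pvFlush]
      | cons r rs =>
        cases hr : pvKey r with
        | true =>
          rw [List.takeWhile_cons_of_pos (by simp [hr]),
              List.dropWhile_cons_of_pos (by simp [hr])]
          conv_lhs => rw [pvGroupby]
          simp only [hr]
          cases cur <;> simp [pvRest, pvBMap, pvFlush]
        | false =>
          rw [List.takeWhile_cons_of_neg (by simp [hr]),
              List.dropWhile_cons_of_neg (by simp [hr])]
          have hfalse : ∀ gs, pvGroupby (r :: rs) = gs →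
              pvRest (cur ++ [PySem.Str.rstrip l]) gs =
                pvFlush (cur ++ [PySem.Str.rstrip l]) :: pvBMap gs := by
            intro gs hgs
            rw [pvGroupby] at hgs
            simp only [hr] at hgs
            subst hgs
            rfl
          rw [hfalse _ rfl]
          cases cur <;> simp [pvRest, pvBMap, pvFlush]
    | false =>
      have hs : PySem.Str.strip l = "" := by
        simpa [pvKey] using hk
      cases cur with
      | nil =>
        rw [show pvStepA (entries, []) l = (entries, []) by simp [pvStepA, hs]]
        rw [ih entries []]
        simp [pvBMap_skip l rest hk]
      | cons c cs =>
        rw [show pvStepA (entries, c :: cs) l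
              = (entries ++ [PySem.Str.strip (PySem.Str.join " " (c :: cs))], []) by
          simp [pvStepA, hs]]
        rw [ih _ []]
        have : pvRest (c :: cs) (pvGroupby (l :: rest))
            = pvFlush (c :: cs) :: pvBMap (pvGroupby (l :: rest)) := by
          rw [pvGroupby]; simp only [hk]; rfl
        simp [this, pvBMap_skip l rest hk, pvFlush]

-- ===== VERDICT (by name: the statement is the Claim_ definition above) =====
theorem parse_history_entries_py_spec : Claim_equal_parse_history_entries_py := by
  intro t _
  unfold Spec_parse_history_entries_py parse_history_entries_py parse_history_entries_py_alt
  have := pv_main (PySem.Str.splitlines t) [] []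
  simpa [pvFlush, pvBMap] using this
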